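-- pv_equiv track=rewrite | github.com/miliar/Code_Jam_Webscraper | solutions_python/solutions_year17_round0_nr2/1711.py | scale_down
-- ===== SOURCE A (Python) =====
-- def scale_down(N):
--     digits = [int(x) for x in str(N)]
--     new = []
--
--     for i in range(0, len(digits), 1):
--         if (i == len(digits)-1):
--             new.append(str(digits[i]))
--             break
--
--         if(digits[i] <= digits[i+1]):
--             new.append(str(digits[i]))
--         else:
--             new.append(str(digits[i]-1))
--             for i in range(len(digits)-(i+1)):
--                 new.append('9')
--             break
--
--     return (int(''.join(new)))
-- ===== SOURCE B (Python) =====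
-- def scale_down(N):
--     digits = [int(x) for x in str(N)]
--     res = []
--     prev = None
--     for d in reversed(digits):
--         if prev is not None and d > prev:
--             res = [d - 1] + [9] * len(res)
--         else:
--             res = [d] + res
--         prev = d
--     return int(''.join(map(str, res)))
-- ===== Notes on version B (the rewrite author's own statement) =====
-- stated objective: alternative
-- what changed: Replaces A's forward index loop that searches for the first descent, breaks, and pads with 9s by a right-to-left fold over the reversed digits that rebuilds the result suffix (a descent overwrites the accumulated suffix with 9s), with no search, no break and no index arithmetic.
import Mathlib
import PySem

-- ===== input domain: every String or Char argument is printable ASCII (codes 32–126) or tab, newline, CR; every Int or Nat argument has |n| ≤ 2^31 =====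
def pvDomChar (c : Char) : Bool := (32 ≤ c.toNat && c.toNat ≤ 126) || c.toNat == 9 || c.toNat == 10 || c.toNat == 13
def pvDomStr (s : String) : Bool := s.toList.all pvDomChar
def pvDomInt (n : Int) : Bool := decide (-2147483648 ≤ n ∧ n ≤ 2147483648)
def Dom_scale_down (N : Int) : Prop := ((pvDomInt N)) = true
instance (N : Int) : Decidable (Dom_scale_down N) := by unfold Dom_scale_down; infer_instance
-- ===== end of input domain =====

-- B replaces A's forward break-laden scan (find first descent, decrement, 9-fill the rest) by a
-- right-to-left fold that rebuilds the suffix: a different traversal order, no search and no break.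

-- ===== PORT A =====
-- digits = [int(x) for x in str(N)]: int on a one-char digit string is its code minus 48
-- (exact under Pre_scale_down, i.e. 0 ≤ N, so every char of str(N) is a digit).
def pvDigits (N : Int) : List Int :=
  (PySem.Int.toChars N).map (fun c => (c.toNat : Int) - 48)

-- A's for-loop over i in range(len(digits)) with its breaks, accumulating `new`.
def pvALoop (ds : List Int) (i : Nat) (new : List (List Char)) : List (List Char) :=
  if i < ds.length then
    if i = ds.length - 1 then new ++ [PySem.Int.toChars (ds.getD i 0)]
    else if ds.getD i 0 ≤ ds.getD (i + 1) 0 then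
      pvALoop ds (i + 1) (new ++ [PySem.Int.toChars (ds.getD i 0)])
    else new ++ [PySem.Int.toChars (ds.getD i 0 - 1)] ++ List.replicate (ds.length - (i + 1)) ['9']
  else new
termination_by ds.length - i

-- int(''.join(new)); the int() cannot fail under Pre_, .getD 0 is never taken there.
def scale_down (N : Int) : Int :=
  (PySem.Int.ofChars? (PySem.Chars.join [] (pvALoop (pvDigits N) 0 []))).getD 0

-- ===== PORT B =====
-- B's loop body: state is (prev, res); on a descent (prev is not None and d > prev) the whole
-- accumulated suffix is overwritten with 9s, else d is consed on.
def pvBDesc (prev : Option Int) (d : Int) : Bool :=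
  match prev with
  | some p => p < d
  | none => false

def pvBStep (st : Option Int × List Int) (d : Int) : Option Int × List Int :=
  (some d,
   if pvBDesc st.1 d then (d - 1) :: List.replicate st.2.length 9
   else d :: st.2)

-- for d in reversed(digits): …  then int(''.join(map(str, res)))
def scale_down_alt (N : Int) : Int :=
  let res := ((pvDigits N).reverse.foldl pvBStep (none, [])).2
  (PySem.Int.ofChars? (PySem.Chars.join [] (res.map PySem.Int.toChars))).getD 0

-- ===== PRECONDITION & SPEC =====
-- Pre_ excludes exactly negative N, on which both Pythons raise ValueError (int('-')).
def Pre_scale_down (N : Int) : Prop := 0 ≤ N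
instance (N : Int) : Decidable (Pre_scale_down N) := by unfold Pre_scale_down; infer_instance
def pvWitness_scale_down : Int := 321

def Spec_scale_down (N : Int) (out : Int) : Prop := out = scale_down_alt N
instance (N : Int) (out : Int) : Decidable (Spec_scale_down N out) := by unfold Spec_scale_down; infer_instance

-- ===== CLAIM (what is proved, stated in full; the proofs are below) =====
def Claim_equal_scale_down : Prop := ∀ (N : Int), Dom_scale_down N → Pre_scale_down N → Spec_scale_down N (scale_down N)

-- ===== LEMMAS AND PROOFS =====

-- The common characterisation both loops are reduced to: copy until the first descent, then
-- decrement and fill with 9s.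
def pvSpec : List Int → List Int
  | [] => []
  | [d] => [d]
  | d :: e :: t => if e < d then (d - 1) :: List.replicate (t.length + 1) 9 else d :: pvSpec (e :: t)

theorem pvSpec_length (ds : List Int) : (pvSpec ds).length = ds.length := by
  fun_induction pvSpec ds with
  | case1 => rfl
  | case2 => rfl
  | case3 d e t h => simp
  | case4 d e t h ih => simpa using ih

-- A's loop from index i < len builds exactly pvSpec of the remaining suffix.
theorem pvALoop_eq (ds : List Int) (i : Nat) (new : List (List Char)) (hi : i < ds.length) :
    pvALoop ds i new = new ++ (pvSpec (ds.drop i)).map PySem.Int.toChars := by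
  have hdrop : ∀ k, k < ds.length → ds.drop k = ds.getD k 0 :: ds.drop (k + 1) := by
    intro k hk
    rw [List.drop_eq_getElem_cons hk, List.getD_eq_getElem ds 0 hk]
  induction hn : ds.length - i using Nat.strong_induction_on generalizing i new with
  | _ n ih =>
  rw [pvALoop, if_pos hi]
  by_cases hlast : i = ds.length - 1
  · have h3 : ds.drop i = [ds.getD i 0] := by
      rw [hdrop i hi, List.drop_eq_nil_of_le (by omega)]
    rw [if_pos hlast, h3, pvSpec]
    simp
  · have hi1 : i + 1 < ds.length := by omega
    have h3 : ds.drop i = ds.getD i 0 :: ds.getD (i + 1) 0 :: ds.drop (i + 2) := by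
      rw [hdrop i hi, hdrop (i + 1) hi1]
    rw [if_neg hlast]
    by_cases hle : ds.getD i 0 ≤ ds.getD (i + 1) 0
    · rw [if_pos hle, ih (ds.length - (i + 1)) (by omega) (i + 1) _ hi1 rfl, h3, pvSpec,
        if_neg (not_lt.mpr hle)]
      rw [← hdrop (i + 1) hi1]
      simp
    · rw [if_neg hle, h3, pvSpec, if_pos (not_le.mp hle)]
      have hlen : (ds.drop (i + 2)).length + 1 = ds.length - (i + 1) := by
        simp [List.length_drop]; omega
      have h9 : PySem.Int.toChars 9 = ['9'] := by decide
      rw [← hlen]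
      simp only [List.map_cons, List.map_replicate, h9, List.append_assoc, List.cons_append,
        List.nil_append]

-- B's fold over the reversed digits lands in the same characterisation, with prev = head.
theorem pvBFold_eq (ds : List Int) :
    ds.reverse.foldl pvBStep (none, []) = (ds.head?, pvSpec ds) := by
  induction ds with
  | nil => rfl
  | cons d s ih =>
    rw [List.reverse_cons, List.foldl_append, ih, List.foldl_cons, List.foldl_nil]
    cases s with
    | nil => simp [pvBStep, pvBDesc, pvSpec]
    | cons e t =>
      simp only [pvBStep, pvBDesc, List.head?_cons, pvSpec]
      by_cases h : e < d
      · simp [h, pvSpec_length]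
      · simp [h]

theorem pvMain (N : Int) : scale_down N = scale_down_alt N := by
  simp only [scale_down, scale_down_alt, pvBFold_eq]
  cases hds : pvDigits N with
  | nil => simp [pvALoop, pvSpec]
  | cons d t =>
    rw [pvALoop_eq (d :: t) 0 [] (by simp)]
    simp

-- ===== VERDICT (by name: the statement is the Claim_ definition above) =====
theorem scale_down_spec : Claim_equal_scale_down := by
  intro N _ _
  unfold Spec_scale_down
  exact pvMain N
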